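-- pv_equiv track=rewrite | github.com/irtazahashmi/pytspl | pytspl/simplicial_complex/simplicial_complex.py | get_faces
-- ===== SOURCE A (Python) =====
-- from itertools import combinations
-- from typing import Hashable, Iterable
--
-- def get_faces(simplex: Iterable[Hashable]) -> set[tuple]:
--     """
--     Return the faces of the simplex in order.
--
--     Args:
--         simplex (Iterable[Hashable]): Simplex for which to find the faces.
--
--     Returns:
--         set[tuple]: Set of faces of the simplex.
--     """
--     faceset = set()
--     numnodes = len(simplex)
--     for r in range(numnodes, 0, -1):
--         for face in combinations(simplex, r):
--             faceset.add(tuple(sorted(face)))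
--     k = len(simplex) - 1
--     faceset = sorted([face for face in faceset if len(face) == k])
--     return faceset
-- ===== SOURCE B (Python) =====
-- def get_faces(simplex):
--     n = len(simplex)
--     if n < 2:
--         return []
--     s = sorted(simplex)
--     return sorted({tuple(s[:i] + s[i + 1:]) for i in range(n)})
-- ===== Notes on version B (the rewrite author's own statement) =====
-- stated objective: faster
-- what changed: B sorts the simplex once and enumerates only the n single-element deletions of the sorted list (deduplicated, then sorted) instead of enumerating all 2^n combinations of every size and filtering for length n-1.
import Mathlib
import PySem

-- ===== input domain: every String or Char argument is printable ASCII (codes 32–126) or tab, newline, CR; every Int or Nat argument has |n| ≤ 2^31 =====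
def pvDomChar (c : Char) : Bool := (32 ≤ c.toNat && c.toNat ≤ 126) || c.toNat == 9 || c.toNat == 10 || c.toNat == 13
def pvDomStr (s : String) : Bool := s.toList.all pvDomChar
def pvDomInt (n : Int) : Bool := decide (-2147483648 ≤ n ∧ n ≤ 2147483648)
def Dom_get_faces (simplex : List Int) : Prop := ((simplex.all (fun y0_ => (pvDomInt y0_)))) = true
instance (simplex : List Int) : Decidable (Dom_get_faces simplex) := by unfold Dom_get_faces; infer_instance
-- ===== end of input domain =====

-- B enumerates only the n-1 single-element deletions of the sorted simplex instead of all 2^n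
-- combinations; objective: faster (asymptotic).

-- ===== PORT A =====
def get_faces (simplex : List Int) : List (List Int) :=
  let numnodes : Int := simplex.length
  let faceset : PySem.Set (List Int) :=
    (PySem.List.pyRange numnodes 0 (-1)).foldl (fun faceset r =>
      (PySem.List.combinations simplex r.toNat).foldl (fun faceset face =>
        PySem.Set.add faceset (PySem.List.sorted face (fun x => x))) faceset)
      PySem.Set.empty
  let k : Int := (simplex.length : Int) - 1
  PySem.List.sorted (faceset.filter (fun face => ((face.length : Int) == k))) (fun x => x)

-- ===== PORT B =====
def get_faces_alt (simplex : List Int) : List (List Int) :=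
  let n := simplex.length
  if n < 2 then []
  else
    let s := PySem.List.sorted simplex (fun x => x)
    PySem.List.sorted
      (PySem.Set.ofList ((List.range n).map (fun (i : Nat) =>
        PySem.List.slice s none (some (i : Int)) ++ PySem.List.slice s (some ((i : Int) + 1)) none)))
      (fun x => x)

-- ===== PRECONDITION & SPEC =====
def Spec_get_faces (simplex : List Int) (out : List (List Int)) : Prop := out = get_faces_alt simplex
instance (simplex : List Int) (out : List (List Int)) : Decidable (Spec_get_faces simplex out) := by unfold Spec_get_faces; infer_instance

-- ===== CLAIM (what is proved, stated in full; the proofs are below) =====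
def Claim_equal_get_faces : Prop := ∀ (simplex : List Int), Dom_get_faces simplex → Spec_get_faces simplex (get_faces simplex)

-- ===== LEMMAS AND PROOFS =====

-- membership in a foldl whose body satisfies a membership law
theorem mem_foldl_body {α β : Type} (body : List α → β → List α) (P : β → α → Prop)
    (hbody : ∀ s b x, x ∈ body s b ↔ x ∈ s ∨ P b x) :
    ∀ (l : List β) (s : List α) (x : α),
      x ∈ l.foldl body s ↔ x ∈ s ∨ ∃ b ∈ l, P b x := by
  intro l
  induction l with
  | nil => intro s x; simp
  | cons b t ih =>
    intro s x
    simp only [List.foldl_cons, ih, hbody]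
    constructor
    · rintro (⟨h | h⟩ | ⟨b', hb', h⟩)
      · exact Or.inl h
      · exact Or.inr ⟨b, by simp, h⟩
      · exact Or.inr ⟨b', by simp [hb'], h⟩
    · rintro (h | ⟨b', hb', h⟩)
      · exact Or.inl (Or.inl h)
      · rcases List.mem_cons.mp hb' with rfl | hb'
        · exact Or.inl (Or.inr h)
        · exact Or.inr ⟨b', hb', h⟩

theorem nodup_foldl_body {α β : Type} (body : List α → β → List α)
    (hbody : ∀ s b, s.Nodup → (body s b).Nodup) :
    ∀ (l : List β) (s : List α), s.Nodup → (l.foldl body s).Nodup := by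
  intro l
  induction l with
  | nil => intro s h; simpa using h
  | cons b t ih => intro s h; exact ih _ (hbody s b h)

-- inner loop of A: add sorted(face) for every combination
theorem mem_inner (simplex : List Int) (r : Nat) (s : List (List Int)) (x : List Int) :
    x ∈ (PySem.List.combinations simplex r).foldl
        (fun fs face => PySem.Set.add fs (PySem.List.sorted face (fun v => v))) s ↔
      x ∈ s ∨ ∃ c ∈ PySem.List.combinations simplex r, x = PySem.List.sorted c (fun v => v) := by
  exact mem_foldl_body _ (fun c x => x = PySem.List.sorted c (fun v => v))
    (fun s c x => by simp [PySem.Set.mem_add s _ x]) _ s x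

-- full faceset of A, as a membership characterisation
theorem mem_facesetA (simplex : List Int) (x : List Int) :
    x ∈ (PySem.List.pyRange (simplex.length : Int) 0 (-1)).foldl (fun faceset r =>
          (PySem.List.combinations simplex r.toNat).foldl (fun faceset face =>
            PySem.Set.add faceset (PySem.List.sorted face (fun v => v))) faceset)
          PySem.Set.empty ↔
      ∃ r : Int, (0 < r ∧ r ≤ (simplex.length : Int)) ∧
        ∃ c, c.Sublist simplex ∧ c.length = r.toNat ∧ x = PySem.List.sorted c (fun v => v) := by
  rw [mem_foldl_body _
      (fun (r : Int) (x : List Int) => ∃ c, c.Sublist simplex ∧ c.length = r.toNat ∧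
        x = PySem.List.sorted c (fun v => v))
      (fun s r x => by
        rw [mem_inner]
        simp [PySem.List.mem_combinations_iff, and_assoc, eq_comm] )]
  simp only [PySem.Set.empty, List.not_mem_nil, false_or]
  constructor
  · rintro ⟨r, hr, hc⟩
    exact ⟨r, by simpa [and_comm] using (PySem.List.mem_pyRange_neg_one.mp hr), hc⟩
  · rintro ⟨r, hr, hc⟩
    exact ⟨r, PySem.List.mem_pyRange_neg_one.mpr ⟨hr.1, hr.2⟩, hc⟩

theorem nodup_facesetA (simplex : List Int) :
    ((PySem.List.pyRange (simplex.length : Int) 0 (-1)).foldl (fun faceset r =>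
          (PySem.List.combinations simplex r.toNat).foldl (fun faceset face =>
            PySem.Set.add faceset (PySem.List.sorted face (fun v => v))) faceset)
          PySem.Set.empty).Nodup := by
  exact nodup_foldl_body _
    (fun s r hs => nodup_foldl_body _ (fun s c hs => PySem.Set.nodup_add s _ hs) _ s hs)
    _ _ (by simp [PySem.Set.empty])

-- a sublist one element shorter than the list is a single-index deletion
theorem sublist_eraseIdx {c xs : List Int} (h : c.Sublist xs) (hl : c.length + 1 = xs.length) :
    ∃ j < xs.length, c = xs.eraseIdx j := by
  induction h with
  | slnil => simp at hl
  | @cons l₁ l₂ a h ih =>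
    simp only [List.length_cons] at hl
    have he : l₁ = l₂ := List.Sublist.eq_of_length h (by omega)
    exact ⟨0, by simp, by simp [he]⟩
  | @cons₂ l₁ l₂ a h ih =>
    simp only [List.length_cons] at hl
    obtain ⟨j, hj, rfl⟩ := ih (by omega)
    exact ⟨j + 1, by simpa using hj, by simp⟩

-- transfer of a single-index deletion across a permutation
theorem perm_eraseIdx_of_perm {xs ys : List Int} (h : xs.Perm ys) {j : Nat} (hj : j < xs.length) :
    ∃ i < ys.length, (xs.eraseIdx j).Perm (ys.eraseIdx i) := by
  have hv : xs[j] ∈ ys := h.mem_iff.mp (xs.getElem_mem hj)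
  obtain ⟨i, hi, hvi⟩ := List.mem_iff_getElem.mp hv
  refine ⟨i, hi, ?_⟩
  have h1 : (xs[j] :: xs.eraseIdx j).Perm xs := List.getElem_cons_eraseIdx_perm hj
  have h2 : (ys[i] :: ys.eraseIdx i).Perm ys := List.getElem_cons_eraseIdx_perm hi
  have h3 : (xs[j] :: xs.eraseIdx j).Perm (xs[j] :: ys.eraseIdx i) := by
    have := (h1.trans h).trans h2.symm
    rwa [hvi] at this
  exact h3.cons_inv

-- sorted of eraseIdx i of the sorted list is that deletion itself
theorem sorted_eraseIdx_sorted (simplex : List Int) (i : Nat) :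
    PySem.List.sorted ((PySem.List.sorted simplex (fun v => v)).eraseIdx i) (fun v => v) =
      (PySem.List.sorted simplex (fun v => v)).eraseIdx i := by
  apply PySem.List.sorted_eq_self_of_pairwise
  exact List.Pairwise.sublist (List.eraseIdx_sublist _ i) (PySem.List.sorted_pairwise simplex _)

-- the key correspondence: sorted (n-1)-element sublists ↔ deletions of the sorted list
theorem faces_correspondence (simplex : List Int) (x : List Int) :
    (∃ c, c.Sublist simplex ∧ c.length + 1 = simplex.length ∧
        x = PySem.List.sorted c (fun v => v)) ↔
      (∃ i < simplex.length,
        x = (PySem.List.sorted simplex (fun v => v)).eraseIdx i) := by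
  set s := PySem.List.sorted simplex (fun v => v) with hs
  have hperm : s.Perm simplex := PySem.List.sorted_perm simplex _ _
  have hlen : s.length = simplex.length := hperm.length_eq
  constructor
  · rintro ⟨c, hsub, hl, rfl⟩
    obtain ⟨j, hj, rfl⟩ := sublist_eraseIdx hsub hl
    obtain ⟨i, hi, hp⟩ := perm_eraseIdx_of_perm hperm.symm hj
    refine ⟨i, by omega, ?_⟩
    calc PySem.List.sorted (simplex.eraseIdx j) (fun v => v)
        = PySem.List.sorted (s.eraseIdx i) (fun v => v) :=
          PySem.List.sorted_eq_sorted_of_perm _ _ _ (fun a b h => h) hp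
      _ = s.eraseIdx i := sorted_eraseIdx_sorted simplex i
  · rintro ⟨i, hi, rfl⟩
    obtain ⟨j, hj, hp⟩ := perm_eraseIdx_of_perm hperm (j := i) (by omega)
    refine ⟨simplex.eraseIdx j, List.eraseIdx_sublist _ j, ?_, ?_⟩
    · have := List.length_eraseIdx_of_lt hj
      omega
    · calc s.eraseIdx i
          = PySem.List.sorted (s.eraseIdx i) (fun v => v) := (sorted_eraseIdx_sorted simplex i).symm
        _ = PySem.List.sorted (simplex.eraseIdx j) (fun v => v) :=
          PySem.List.sorted_eq_sorted_of_perm _ _ _ (fun a b h => h) hp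

theorem sortedLI_eq_of_perm (xs ys : List (List Int)) (h : xs.Perm ys) :
    PySem.List.sorted xs (fun x => x) = PySem.List.sorted ys (fun x => x) := by
  have h2 := @PySem.List.sorted_eq_sorted_of_perm (List Int) (List Int) List.instLinearOrder
    xs ys (fun a => a) (fun a b h => h) h
  convert h2 using 2

-- B's slice pair is a single-index deletion (rewrites under the map binder)
theorem slice_del (s : List Int) (i : Nat) :
    PySem.List.slice s none (some (i : Int)) ++
      PySem.List.slice s (some ((i : Int) + 1)) none = s.eraseIdx i := by
  have h1 : ((i : Int) + 1) = ((i + 1 : Nat) : Int) := by push_cast; ring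
  rw [PySem.List.slice_to_natCast, h1, PySem.List.slice_from_natCast,
    ← List.eraseIdx_eq_take_drop_succ]

-- ===== VERDICT (by name: the statement is the Claim_ definition above) =====
theorem get_faces_spec : Claim_equal_get_faces := by
  intro simplex _
  unfold Spec_get_faces get_faces get_faces_alt
  simp only [slice_del]
  by_cases hsmall : simplex.length < 2
  · rw [if_pos hsmall]
    rw [PySem.List.sorted_eq_nil_iff]
    rw [List.eq_nil_iff_forall_not_mem]
    intro x hx
    rw [List.mem_filter] at hx
    obtain ⟨hx1, hx2⟩ := hx
    rw [mem_facesetA] at hx1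
    obtain ⟨r, ⟨hr1, hr2⟩, c, _, hcl, rfl⟩ := hx1
    rw [beq_iff_eq] at hx2
    rw [PySem.List.length_sorted] at hx2
    omega
  · rw [if_neg hsmall]
    apply sortedLI_eq_of_perm
    rw [List.perm_ext_iff_of_nodup
      (List.Nodup.filter _ (nodup_facesetA simplex)) (PySem.Set.nodup_ofList _)]
    intro x
    rw [List.mem_filter, mem_facesetA, PySem.Set.mem_ofList, List.mem_map]
    constructor
    · rintro ⟨⟨r, ⟨hr1, hr2⟩, c, hsub, hcl, rfl⟩, hlen⟩
      rw [beq_iff_eq, PySem.List.length_sorted] at hlen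
      obtain ⟨i, hi, hx⟩ := (faces_correspondence simplex _).mp
        ⟨c, hsub, by omega, rfl⟩
      exact ⟨i, List.mem_range.mpr hi, hx.symm⟩
    · rintro ⟨i, hi, rfl⟩
      rw [List.mem_range] at hi
      obtain ⟨c, hsub, hcl, hx⟩ := (faces_correspondence simplex _).mpr ⟨i, hi, rfl⟩
      constructor
      · exact ⟨((simplex.length : Int) - 1), ⟨by omega, by omega⟩, c, hsub, by omega, hx⟩
      · rw [beq_iff_eq, hx, PySem.List.length_sorted]
        omega
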